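-- pv_equiv track=rewrite | github.com/pragmaconflux/titan1 | titan_decoder/core/detection_rules.py | _detect_lolbin_pattern
-- ===== SOURCE A (Python) =====
-- from typing import Dict, Any, List, Callable
--
-- def _detect_lolbin_pattern(report: Dict[str, Any]) -> bool:
--     """Detect LOLBin execution patterns."""
--     nodes = report.get("nodes", [])
--     lolbins = [
--         "powershell",
--         "cmd.exe",
--         "wscript",
--         "cscript",
--         "mshta",
--         "rundll32",
--         "regsvr32",
--     ]
--
--     text = "\n".join(node.get("content_preview", "").lower() for node in nodes)
--
--     return any(lolbin in text for lolbin in lolbins)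
-- ===== SOURCE B (Python) =====
-- _LOLBINS = [
--     "powershell",
--     "cmd.exe",
--     "wscript",
--     "cscript",
--     "mshta",
--     "rundll32",
--     "regsvr32",
-- ]
--
--
-- def _insert(trie, word):
--     # trie: None = no match, True = accepting, (char, child, sibling) = branch
--     if not word:
--         return True
--     if trie is True:
--         return True
--     if trie is None:
--         return (word[0], _insert(None, word[1:]), None)
--     c, child, sibling = trie
--     if word[0] == c:
--         return (c, _insert(child, word[1:]), sibling)
--     return (c, child, _insert(sibling, word))
--
--
-- _TRIE = None
-- for _w in _LOLBINS:
--     _TRIE = _insert(_TRIE, _w)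
--
--
-- def _accepts(trie, text, i):
--     # does some inserted word start at position i of text?
--     if trie is None:
--         return False
--     if trie is True:
--         return True
--     if i >= len(text):
--         return False
--     c, child, sibling = trie
--     if text[i] == c:
--         return _accepts(child, text, i + 1) or _accepts(sibling, text, i)
--     return _accepts(sibling, text, i)
--
--
-- def _detect_lolbin_pattern(report):
--     """Detect LOLBin execution patterns."""
--     nodes = report.get("nodes", [])
--     text = "\n".join(node.get("content_preview", "").lower() for node in nodes)
--     for i in range(len(text)):
--         if _accepts(_TRIE, text, i):
--             return True
--     return False
-- ===== Notes on version B (the rewrite author's own statement) =====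
-- stated objective: alternative
-- what changed: B builds a prefix tree (trie) of the seven LOLBin names once and makes a single left-to-right scan of the joined lowered text, deciding all patterns at each position with one trie walk and returning at the first hit, instead of A's seven independent full substring scans.
import Mathlib
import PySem

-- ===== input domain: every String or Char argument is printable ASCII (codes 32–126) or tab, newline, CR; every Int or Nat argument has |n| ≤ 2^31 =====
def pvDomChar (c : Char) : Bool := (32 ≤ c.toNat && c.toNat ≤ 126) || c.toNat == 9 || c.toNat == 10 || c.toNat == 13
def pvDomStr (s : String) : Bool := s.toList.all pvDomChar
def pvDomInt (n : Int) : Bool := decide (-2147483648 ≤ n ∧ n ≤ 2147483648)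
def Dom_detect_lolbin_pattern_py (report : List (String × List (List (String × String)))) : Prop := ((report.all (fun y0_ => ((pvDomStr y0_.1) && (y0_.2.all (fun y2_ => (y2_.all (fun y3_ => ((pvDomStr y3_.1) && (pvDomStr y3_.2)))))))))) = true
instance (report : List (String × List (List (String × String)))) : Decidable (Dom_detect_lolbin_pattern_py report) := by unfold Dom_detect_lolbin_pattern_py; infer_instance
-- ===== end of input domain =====

-- B builds a trie of the seven LOLBin names once and makes a single scan of the joined lowered
-- text, one trie walk per position, instead of A's seven independent substring scans.

-- ===== PORT A =====
def pvLolbins : List String :=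
  ["powershell", "cmd.exe", "wscript", "cscript", "mshta", "rundll32", "regsvr32"]

def detect_lolbin_pattern_py (report : List (String × List (List (String × String)))) : Bool :=
  let nodes := PySem.Dict.getD (PySem.Dict.mk report) "nodes" []
  let text := PySem.Str.join "\n"
    (nodes.map (fun node => PySem.Str.lower (PySem.Dict.getD (PySem.Dict.mk node) "content_preview" "")))
  pvLolbins.any (fun lolbin => PySem.Str.isIn lolbin text)

-- ===== PORT B =====
-- trie: fail = no match, accept = a word ends here, branch c child sibling
inductive PvTrie
  | fail
  | accept
  | branch : Char → PvTrie → PvTrie → PvTrie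
deriving DecidableEq, Repr

def pvInsert : PvTrie → List Char → PvTrie
  | _, [] => .accept
  | .accept, _ :: _ => .accept
  | .fail, c :: cs => .branch c (pvInsert .fail cs) .fail
  | .branch c' child sib, c :: cs =>
    if c = c' then .branch c' (pvInsert child cs) sib
    else .branch c' child (pvInsert sib (c :: cs))
termination_by t w => (w.length, sizeOf t)

def pvLolbinsB : List String :=
  ["powershell", "cmd.exe", "wscript", "cscript", "mshta", "rundll32", "regsvr32"]

def pvTrie : PvTrie := pvLolbinsB.foldl (fun t w => pvInsert t w.toList) .fail

-- does some inserted word start at the head of s?  (Source B's _accepts; Python's index i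
-- into text corresponds to the suffix s here)
def pvAccepts : PvTrie → List Char → Bool
  | .fail, _ => false
  | .accept, _ => true
  | .branch _ _ _, [] => false
  | .branch c child sib, x :: xs =>
    if x = c then pvAccepts child xs || pvAccepts sib (x :: xs)
    else pvAccepts sib (x :: xs)
termination_by t s => (s.length, sizeOf t)

-- Source B's 'for i in range(len(text)): if _accepts(...): return True' — one pass over positions
def pvScan (t : PvTrie) : List Char → Bool
  | [] => false
  | x :: xs => pvAccepts t (x :: xs) || pvScan t xs

def detect_lolbin_pattern_py_alt (report : List (String × List (List (String × String)))) : Bool :=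
  let nodes := PySem.Dict.getD (PySem.Dict.mk report) "nodes" []
  let text := PySem.Str.join "\n"
    (nodes.map (fun node => PySem.Str.lower (PySem.Dict.getD (PySem.Dict.mk node) "content_preview" "")))
  pvScan pvTrie text.toList

-- ===== PRECONDITION & SPEC =====
def Spec_detect_lolbin_pattern_py (report : List (String × List (List (String × String)))) (out : Bool) : Prop := out = detect_lolbin_pattern_py_alt report
instance (report : List (String × List (List (String × String)))) (out : Bool) : Decidable (Spec_detect_lolbin_pattern_py report out) := by unfold Spec_detect_lolbin_pattern_py; infer_instance

-- ===== CLAIM =====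
def Claim_equal_detect_lolbin_pattern_py : Prop := ∀ (report : List (String × List (List (String × String)))), Dom_detect_lolbin_pattern_py report → Spec_detect_lolbin_pattern_py report (detect_lolbin_pattern_py report)

-- ===== LEMMAS AND PROOFS =====

theorem accepts_insert (t : PvTrie) (w s : List Char) :
    pvAccepts (pvInsert t w) s = (decide (w <+: s) || pvAccepts t s) := by
  induction t, w using pvInsert.induct generalizing s with
  | case1 t => simp [pvInsert, pvAccepts]
  | case2 c cs => simp [pvInsert, pvAccepts]
  | case3 c cs ih =>
    cases s with
    | nil => simp [pvInsert, pvAccepts]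
    | cons x xs =>
      by_cases hx : x = c
      · subst hx; simp [pvInsert, pvAccepts, ih, List.cons_prefix_cons]
      · simp [pvInsert, pvAccepts, hx, List.cons_prefix_cons]
        exact fun h => absurd h.symm hx
  | case4 child sib c cs ih =>
    cases s with
    | nil => simp [pvInsert, pvAccepts]
    | cons x xs =>
      by_cases hx : x = c
      · subst hx
        simp [pvInsert, pvAccepts, ih, List.cons_prefix_cons, Bool.or_assoc]
      · simp [pvInsert, pvAccepts, hx, List.cons_prefix_cons]
        exact fun h => absurd h.symm hx
  | case5 c' child sib c cs hc ih =>
    cases s with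
    | nil => simp [pvInsert, pvAccepts, hc]
    | cons x xs =>
      by_cases hx : x = c'
      · subst hx
        simp [pvInsert, pvAccepts, ih, List.cons_prefix_cons, hc]
      · simp [pvInsert, pvAccepts, if_neg hc, hx, ih]

theorem accepts_foldl (ws : List String) (t : PvTrie) (s : List Char) :
    pvAccepts (ws.foldl (fun t w => pvInsert t w.toList) t) s
      = (ws.any (fun w => decide (w.toList <+: s)) || pvAccepts t s) := by
  induction ws generalizing t with
  | nil => simp
  | cons w ws ih =>
    simp [List.foldl_cons, ih, accepts_insert, Bool.or_assoc, Bool.or_comm]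

theorem scan_eq (t : PvTrie) (h : pvAccepts t [] = false) (s : List Char) :
    pvScan t s = s.tails.any (pvAccepts t) := by
  induction s with
  | nil => simp [pvScan, h]
  | cons x xs ih => simp [pvScan, ih]

theorem any_swap {α β : Type} (xs : List α) (ys : List β) (p : α → β → Bool) :
    xs.any (fun x => ys.any (fun y => p x y)) = ys.any (fun y => xs.any (fun x => p x y)) := by
  rw [Bool.eq_iff_iff]; simp only [List.any_eq_true]; tauto

theorem tails_any_prefix (p s : List Char) :
    s.tails.any (fun suf => decide (p <+: suf)) = decide (p <:+: s) := by
  rw [Bool.eq_iff_iff]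
  simp only [List.any_eq_true, decide_eq_true_eq, List.mem_tails]
  rw [List.infix_iff_prefix_suffix]
  tauto

theorem scan_trie (s : List Char) :
    pvScan pvTrie s = pvLolbins.any (fun p => decide (p.toList <:+: s)) := by
  have h0 : pvAccepts pvTrie [] = false := by
    show pvAccepts (pvLolbinsB.foldl (fun t w => pvInsert t w.toList) .fail) [] = false
    rw [accepts_foldl]
    simp [pvAccepts, pvLolbinsB]
  rw [scan_eq _ h0]
  have : ∀ suf, pvAccepts pvTrie suf
      = pvLolbins.any (fun w => decide (w.toList <+: suf)) := by
    intro suf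
    show pvAccepts (pvLolbinsB.foldl (fun t w => pvInsert t w.toList) .fail) suf = _
    rw [accepts_foldl]
    simp only [pvAccepts, Bool.or_false]
    rfl
  rw [funext this, any_swap]
  exact congrArg _ (funext fun p => tails_any_prefix p.toList s)

-- ===== VERDICT =====
theorem detect_lolbin_pattern_py_spec : Claim_equal_detect_lolbin_pattern_py := by
  intro report _
  show detect_lolbin_pattern_py report = detect_lolbin_pattern_py_alt report
  simp only [detect_lolbin_pattern_py, detect_lolbin_pattern_py_alt, scan_trie]
  refine congrArg _ (funext fun p => ?_)
  rw [Bool.eq_iff_iff, PySem.Str.isIn_iff_infix, decide_eq_true_eq]
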